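-- pv_equiv track=rewrite | github.com/caperaven/ui_testing_processes | src/evaluate.py | clean_exp
-- ===== SOURCE A (Python) =====
-- def clean_exp(expr):
--     if not expr.__contains__("."):
--         return expr
--
--     expr = expr.replace(" || ", " or ").replace(" && ", " and ")
--
--     parts = expr.split(" ")
--     for i in range(0, len(parts)):
--         path = parts[i]
--         if path.__contains__("."):
--             path_parts = path.split(".")
--             result_parts = [path_parts[0]]
--
--             for j in range(1, len(path_parts)):
--                 result_parts.append('["{}"]'.format(path_parts[j]))
--
--             new_expr = "".join(result_parts)
--             parts[i] = new_expr
--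
--     return " ".join(parts)
-- ===== SOURCE B (Python) =====
-- def clean_exp(expr):
--     # Single left-to-right character scan instead of split(" ")/split(".") token rebuilding.
--     if "." not in expr:
--         return expr
--     expr = expr.replace(" || ", " or ").replace(" && ", " and ")
--     out = []
--     i = 0
--     n = len(expr)
--     while i < n:
--         c = expr[i]
--         if c == ".":
--             j = i + 1
--             while j < n and expr[j] != "." and expr[j] != " ":
--                 j += 1
--             out.append('["' + expr[i + 1:j] + '"]')
--             i = j
--         else:
--             out.append(c)
--             i += 1
--     return "".join(out)
-- ===== Notes on version B (the rewrite author's own statement) =====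
-- stated objective: alternative
-- what changed: Replaces A's split-on-space loop with a nested split-on-dot token rebuild by a single left-to-right character scan that brackets each dot-segment in place.
import Mathlib
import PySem

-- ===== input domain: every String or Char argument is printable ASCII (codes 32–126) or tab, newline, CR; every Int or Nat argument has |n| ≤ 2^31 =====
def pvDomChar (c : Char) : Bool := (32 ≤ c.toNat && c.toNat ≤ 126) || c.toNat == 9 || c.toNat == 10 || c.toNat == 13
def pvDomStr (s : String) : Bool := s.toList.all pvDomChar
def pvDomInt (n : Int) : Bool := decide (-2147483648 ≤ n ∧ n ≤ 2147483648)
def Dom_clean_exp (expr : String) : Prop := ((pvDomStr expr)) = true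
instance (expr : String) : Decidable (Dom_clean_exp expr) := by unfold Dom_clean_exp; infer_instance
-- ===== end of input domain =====

-- B replaces A's split-on-space / split-on-dot token rebuilding by a single left-to-right
-- character scan that brackets each '.'-segment in place (objective: alternative, same cost).

-- ===== PORT A =====
-- '["{}"]'.format(q)
def pvBracket (q : List Char) : List Char := '[' :: '"' :: (q ++ ['"', ']'])

-- A's per-token body: split on ".", keep the head, bracket the rest, join with ""
-- (path_parts[0] is safe: Python split never returns an empty list, hence headD)
def pvRebuildA (path : List Char) : List Char :=
  if PySem.Chars.isIn ['.'] path then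
    let path_parts := PySem.Chars.splitOn path ['.']
    let result_parts := [path_parts.headD []] ++ (path_parts.drop 1).map pvBracket
    PySem.Chars.join [] result_parts
  else path

def clean_exp (expr : String) : String :=
  if ¬ (PySem.Str.isIn "." expr) then expr
  else
    let e1 := PySem.Str.replace expr " || " " or "
    let e2 := PySem.Str.replace e1 " && " " and "
    let parts := PySem.Chars.splitOn e2.toList [' ']
    -- for i in range(len(parts)): parts[i] = rebuilt parts[i]  (in-place update = map)
    String.ofList (PySem.Chars.join [' '] (parts.map pvRebuildA))

-- ===== PORT B =====
-- the inner while loop's continuation test: expr[j] != "." and expr[j] != " "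
def pvSeg (c : Char) : Bool := c ≠ '.' && c ≠ ' '

-- B's while loop over the characters; out.append + "".join ported as direct concatenation,
-- the inner index-advancing while as takeWhile/dropWhile
def pvScanB : List Char → List Char
  | [] => []
  | c :: rest =>
    if c = '.' then
      pvBracket (rest.takeWhile pvSeg) ++ pvScanB (rest.dropWhile pvSeg)
    else c :: pvScanB rest
termination_by l => l.length
decreasing_by
  · exact Nat.lt_succ_of_le (List.length_dropWhile_le _ _)
  · simp

def clean_exp_alt (expr : String) : String :=
  if ¬ (PySem.Str.isIn "." expr) then expr
  else
    let e1 := PySem.Str.replace expr " || " " or "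
    let e2 := PySem.Str.replace e1 " && " " and "
    String.ofList (pvScanB e2.toList)

-- ===== PRECONDITION & SPEC =====
def Spec_clean_exp (expr : String) (out : String) : Prop := out = clean_exp_alt expr
instance (expr : String) (out : String) : Decidable (Spec_clean_exp expr out) := by unfold Spec_clean_exp; infer_instance

-- ===== CLAIM (what is proved, stated in full; the proofs are below) =====
def Claim_equal_clean_exp : Prop := ∀ (expr : String), Dom_clean_exp expr → Spec_clean_exp expr (clean_exp expr)

-- ===== LEMMAS AND PROOFS =====

-- PySem's fuel-based single-character splitOn is core List.splitOn
theorem splitOn_go_single (c : Char) :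
    ∀ (fuel : Nat) (l cur : List Char) (acc : List (List Char)), l.length < fuel →
      PySem.Chars.splitOn.go [c] fuel l cur acc
        = acc.reverse ++ (List.splitOn c l).modifyHead (cur.reverse ++ ·) := by
  intro fuel
  induction fuel with
  | zero => intro l cur acc h; omega
  | succ f ih =>
    intro l cur acc h
    cases l with
    | nil =>
      rw [PySem.Chars.splitOn.go.eq_def]
      simp [List.splitOn, List.splitOnP_nil]
    | cons c' rest =>
      have hgo : PySem.Chars.splitOn.go [c] (f + 1) (c' :: rest) cur acc
          = if [c].isPrefixOf (c' :: rest) = true then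
              PySem.Chars.splitOn.go [c] f (List.drop [c].length (c' :: rest)) [] (cur.reverse :: acc)
            else PySem.Chars.splitOn.go [c] f rest (c' :: cur) acc := rfl
      rw [hgo]
      by_cases hc : c = c'
      · subst hc
        rw [if_pos (by simp [List.isPrefixOf] : ([c].isPrefixOf (c :: rest)) = true)]
        have hdrop : List.drop [c].length (c :: rest) = rest := by simp
        rw [hdrop, ih rest [] (cur.reverse :: acc) (by simpa using Nat.lt_of_succ_lt_succ h)]
        simp only [List.splitOn, List.splitOnP_cons, BEq.rfl, if_pos, List.reverse_cons,
          List.reverse_nil, List.nil_append, List.modifyHead_cons, List.append_assoc,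
          List.cons_append, List.append_cancel_left_eq]
        cases List.splitOnP (fun x => x == c) rest <;> simp
      · have hpre : ([c].isPrefixOf (c' :: rest)) = false := by
          simp [List.isPrefixOf]; exact hc
        rw [hpre]
        simp only [Bool.false_eq_true, if_false]
        rw [ih rest (c' :: cur) acc (by simpa using Nat.lt_of_succ_lt_succ h)]
        have hne : List.splitOnP (· == c) rest ≠ [] := List.splitOnP_ne_nil _ _
        simp only [List.splitOn, List.splitOnP_cons, beq_iff_eq]
        rw [if_neg (by exact fun h' => hc h'.symm)]
        cases hsp : List.splitOnP (· == c) rest with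
        | nil => exact absurd hsp hne
        | cons hd tl => simp

theorem splitOn_single (c : Char) (l : List Char) :
    PySem.Chars.splitOn l [c] = List.splitOn c l := by
  unfold PySem.Chars.splitOn
  rw [splitOn_go_single c (l.length + 1) l [] [] (Nat.lt_succ_self _)]
  cases h : List.splitOn c l with
  | nil => exact absurd h (List.splitOnP_ne_nil _ _)
  | cons hd tl => simp

theorem join_nil_flatten : ∀ (l : List (List Char)), PySem.Chars.join [] l = l.flatten
  | [] => by simp [PySem.Chars.join_nil]
  | [p] => by simp [PySem.Chars.join_singleton]
  | p :: q :: rest => by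
    rw [PySem.Chars.join_cons_cons, join_nil_flatten (q :: rest)]
    simp

-- B's rebuilt token, expressed over core splitOn (helper for the proofs)
def pvRebuild (p : List Char) : List Char :=
  (List.splitOn '.' p).headD [] ++ (((List.splitOn '.' p).drop 1).map pvBracket).flatten

theorem rebuildA_eq (p : List Char) : pvRebuildA p = pvRebuild p := by
  unfold pvRebuildA pvRebuild
  rw [splitOn_single]
  by_cases h : PySem.Chars.isIn ['.'] p = true
  · simp only [h, if_true, join_nil_flatten]
    cases hsp : List.splitOn '.' p with
    | nil => exact absurd hsp (List.splitOnP_ne_nil _ _)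
    | cons hd tl => simp
  · simp only [h]
    have hnd : ∀ x ∈ p, ¬((x == '.') = true) := by
      intro x hx hxe
      apply h
      rw [PySem.Chars.isIn_iff_infix]
      obtain ⟨a, b, rfl⟩ := List.mem_iff_append.mp hx
      exact ⟨a, b, by simpa using (beq_iff_eq.mp hxe).symm⟩
    rw [List.splitOn, List.splitOnP_eq_single _ _ hnd]
    simp

theorem splitOnP_middle (p : Char → Bool) (a : List Char) (x : Char) (b : List Char)
    (ha : ∀ y ∈ a, p y = false) (hx : p x = true) :
    List.splitOnP p (a ++ x :: b) = a :: List.splitOnP p b := by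
  induction a with
  | nil => simp [List.splitOnP_cons, hx]
  | cons y a iha =>
    have hy : p y = false := ha y (by simp)
    rw [List.cons_append, List.splitOnP_cons, hy,
      iha (fun z hz => ha z (by simp [hz]))]
    simp

theorem takeWhile_append_stop (r b : List Char) :
    (r ++ ' ' :: b).takeWhile pvSeg = r.takeWhile pvSeg ∧
    (r ++ ' ' :: b).dropWhile pvSeg = r.dropWhile pvSeg ++ ' ' :: b := by
  induction r with
  | nil => simp [List.takeWhile, List.dropWhile, pvSeg]
  | cons c r ih =>
    by_cases hc : pvSeg c
    · simp [hc, ih.1, ih.2]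
    · simp [hc]

-- the scan never crosses a space
theorem scanB_append_space (a b : List Char) :
    pvScanB (a ++ ' ' :: b) = pvScanB a ++ ' ' :: pvScanB b := by
  induction a using pvScanB.induct with
  | case1 =>
    rw [List.nil_append, pvScanB.eq_def]
    simp [pvScanB]
  | case2 rest ih =>
    rw [List.cons_append, pvScanB, if_pos rfl,
      (takeWhile_append_stop rest b).1, (takeWhile_append_stop rest b).2, ih,
      pvScanB, if_pos rfl]
    simp
  | case3 c rest hc ih =>
    rw [List.cons_append, pvScanB, if_neg hc, ih, pvScanB, if_neg hc]
    rfl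

theorem rebuild_dot (r : List Char) :
    pvRebuild ('.' :: r) = (List.map pvBracket (List.splitOn '.' r)).flatten := by
  unfold pvRebuild
  simp only [List.splitOn]
  rw [List.splitOnP_cons, if_pos (by simp)]
  cases hsp : List.splitOnP (fun x => x == '.') r with
  | nil => exact absurd hsp (List.splitOnP_ne_nil _ _)
  | cons hd tl => simp

-- on a space-free token the scan is A's rebuild
theorem scanB_token (p : List Char) (hp : ' ' ∉ p) : pvScanB p = pvRebuild p := by
  induction p using pvScanB.induct with
  | case1 =>
    rw [pvScanB]
    simp [pvRebuild, List.splitOn, List.splitOnP_nil]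
  | case2 rest ih =>
    have hpr : ' ' ∉ rest := fun hm => hp (by simp [hm])
    have hseg : ∀ y ∈ rest.takeWhile pvSeg, (y == '.') = false := by
      intro y hy
      have := List.mem_takeWhile_imp hy
      simp [pvSeg] at this
      simp [this.1]
    cases hd : rest.dropWhile pvSeg with
    | nil =>
      have hall : ∀ x ∈ rest, pvSeg x = true := List.dropWhile_eq_nil_iff.mp hd
      have htw : rest.takeWhile pvSeg = rest := List.takeWhile_eq_self_iff.mpr hall
      have hnd : ∀ x ∈ rest, ¬((x == '.') = true) := by
        intro x hx hxe
        have := hall x hx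
        simp [pvSeg, beq_iff_eq.mp hxe] at this
      rw [pvScanB, if_pos rfl, hd, htw, pvScanB, rebuild_dot,
        List.splitOn, List.splitOnP_eq_single _ _ hnd]
      simp
    | cons d0 d' =>
      have hd0 : pvSeg d0 = false := by
        have h1 := List.head?_dropWhile_not pvSeg rest
        rw [hd] at h1
        simpa using h1
      have hd0s : d0 ≠ ' ' := by
        intro he
        apply hpr
        have : d0 ∈ rest.dropWhile pvSeg := by simp [hd]
        exact he ▸ (List.dropWhile_sublist (p := pvSeg)).subset this
      have hd0d : d0 = '.' := by
        simp [pvSeg] at hd0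
        tauto
      subst hd0d
      have hrest : rest = rest.takeWhile pvSeg ++ '.' :: d' := by
        conv_lhs => rw [← List.takeWhile_append_dropWhile (p := pvSeg) (l := rest)]
        rw [hd]
      have hips : ' ' ∉ rest.dropWhile pvSeg := fun hm => hpr ((List.dropWhile_sublist (p := pvSeg)).subset hm)
      rw [pvScanB, if_pos rfl, ih hips, hd, rebuild_dot, rebuild_dot]
      conv_rhs => rw [hrest]
      simp only [List.splitOn]
      rw [splitOnP_middle _ _ _ _ (fun y hy => hseg y hy) (by simp)]
      simp
  | case3 c rest hc ih =>
    have hpr : ' ' ∉ rest := fun hm => hp (by simp [hm])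
    rw [pvScanB, if_neg hc, ih hpr]
    unfold pvRebuild
    simp only [List.splitOn]
    rw [List.splitOnP_cons, if_neg (by simpa using fun h' => hc h')]
    cases hsp : List.splitOnP (fun x => x == '.') rest with
    | nil => exact absurd hsp (List.splitOnP_ne_nil _ _)
    | cons hd tl => simp

def pvSegSp (c : Char) : Bool := c != ' '

-- the main list-level equality, by strong induction on the length
theorem main_eq_aux : ∀ (n : Nat) (l : List Char), l.length ≤ n →
    PySem.Chars.join [' '] ((PySem.Chars.splitOn l [' ']).map pvRebuildA) = pvScanB l := by
  intro n
  induction n with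
  | zero =>
    intro l hl
    have : l = [] := List.eq_nil_of_length_eq_zero (Nat.le_zero.mp hl)
    subst this
    rw [splitOn_single, pvScanB]
    simp [List.splitOn, List.splitOnP_nil, PySem.Chars.join_singleton, rebuildA_eq,
      pvRebuild]
  | succ n ih =>
    intro l hl
    rw [splitOn_single]
    by_cases hm : ' ' ∈ l
    · have hdne : l.dropWhile pvSegSp ≠ [] := by
        intro he
        have := List.dropWhile_eq_nil_iff.mp he _ hm
        simp [pvSegSp] at this
      obtain ⟨d0, d', hd⟩ := List.exists_cons_of_ne_nil hdne
      have hd0 : d0 = ' ' := by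
        have h1 := List.head?_dropWhile_not pvSegSp l
        rw [hd] at h1
        simpa [pvSegSp] using h1
      subst hd0
      have hlsplit : l = l.takeWhile pvSegSp ++ ' ' :: d' := by
        conv_lhs => rw [← List.takeWhile_append_dropWhile (p := pvSegSp) (l := l)]
        rw [hd]
      have hta : ∀ y ∈ l.takeWhile pvSegSp, (y == ' ') = false := by
        intro y hy
        have := List.mem_takeWhile_imp hy
        simp [pvSegSp] at this
        simp [this]
      have htns : ' ' ∉ l.takeWhile pvSegSp := by
        intro hy
        have := hta _ hy
        simp at this
      have hlen : d'.length ≤ n := by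
        have := congrArg List.length hlsplit
        simp at this
        omega
      conv_rhs => rw [hlsplit]
      rw [scanB_append_space]
      conv_lhs => rw [hlsplit]
      rw [List.splitOn, splitOnP_middle _ _ _ _ hta (by simp)]
      have hb := ih d' hlen
      rw [splitOn_single] at hb
      cases hsp : List.splitOnP (· == ' ') d' with
      | nil => exact absurd hsp (List.splitOnP_ne_nil _ _)
      | cons h0 t0 =>
        rw [List.map_cons, List.map_cons, PySem.Chars.join_cons_cons,
          rebuildA_eq, scanB_token _ htns]
        rw [List.splitOn, hsp, List.map_cons] at hb
        rw [hb]
        simp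
    · have hnd : ∀ x ∈ l, ¬((x == ' ') = true) := by
        intro x hx hxe
        exact hm (beq_iff_eq.mp hxe ▸ hx)
      rw [List.splitOn, List.splitOnP_eq_single _ _ hnd, List.map_singleton,
        PySem.Chars.join_singleton, rebuildA_eq, scanB_token _ hm]

-- ===== VERDICT (by name: the statement is the Claim_ definition above) =====
theorem clean_exp_spec : Claim_equal_clean_exp := by
  intro expr _
  unfold Spec_clean_exp clean_exp clean_exp_alt
  by_cases hch : PySem.Chars.isIn ['.'] expr.toList
  · rw [if_neg (by simp [hch]), if_neg (by simp [hch])]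
    exact congrArg String.ofList (main_eq_aux _ _ (Nat.le_refl _))
  · rw [if_pos (by simp [hch]), if_pos (by simp [hch])]
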